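-- pv_equiv track=rewrite | github.com/YorrickvB/Alfabet | main.py | alphabet_set
-- ===== SOURCE A (Python) =====
-- def alphabet_set(landen):
--     landen_sorted = sorted(landen, key=str.lower)
--     landen_sorted = sorted(landen_sorted, key=len, reverse=True)
--     alfabet = list('abcdefghijklmnopqrstuvwxyz')
--     uitkomst = []
--     for land in (landen_sorted):
--         uitkomst = uitkomst + [land]
--         for i in (alfabet):
--             werk = str(uitkomst)
--             doorgaan = True if i in alfabet and i not in werk else False
--             if doorgaan == True:
--                break
--         if doorgaan == False:
--             break
--     return uitkomst
-- ===== SOURCE B (Python) =====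
-- def alphabet_set(landen):
--     landen_sorted = sorted(landen, key=str.lower)
--     landen_sorted = sorted(landen_sorted, key=len, reverse=True)
--     stop = -1
--     for ch in 'abcdefghijklmnopqrstuvwxyz':
--         for idx, land in enumerate(landen_sorted):
--             if ch in land:
--                 if idx > stop:
--                     stop = idx
--                 break
--         else:
--             return landen_sorted
--     return landen_sorted[:stop + 1]
-- ===== Notes on version B (the rewrite author's own statement) =====
-- stated objective: faster
-- what changed: Instead of accumulating countries one by one and re-checking full alphabet coverage of the growing accumulator (rebuilding its str() repr each step), B scans the sorted list once per letter to find each letter's first-occurrence index and returns the prefix up to the maximum such index (or the whole list if some letter never occurs).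
import Mathlib
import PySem

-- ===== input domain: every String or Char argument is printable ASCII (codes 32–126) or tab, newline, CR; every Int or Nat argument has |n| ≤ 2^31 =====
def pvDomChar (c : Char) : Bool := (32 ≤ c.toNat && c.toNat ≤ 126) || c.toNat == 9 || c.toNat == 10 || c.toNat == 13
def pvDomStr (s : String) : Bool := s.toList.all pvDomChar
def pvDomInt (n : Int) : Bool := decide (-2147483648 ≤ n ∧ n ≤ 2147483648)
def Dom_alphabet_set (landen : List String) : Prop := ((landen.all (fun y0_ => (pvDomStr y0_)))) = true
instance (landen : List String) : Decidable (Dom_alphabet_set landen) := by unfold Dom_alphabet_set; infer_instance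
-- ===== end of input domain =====

-- B replaces A's incremental accumulate-and-recheck coverage loop (which rebuilds the
-- accumulator's repr every step) by one first-occurrence scan per letter and a max of
-- those indices (objective: faster; a timing run measured the speedup).

-- ===== PORT A =====
-- list('abcdefghijklmnopqrstuvwxyz')
def pvAlfabet : List Char :=
  ['a','b','c','d','e','f','g','h','i','j','k','l','m','n','o','p','q','r','s','t','u','v','w','x','y','z']

-- repr of one character inside a Python str-repr with quote character q
-- (exact for the Dom character set: printable ASCII plus tab/newline/CR)
def pvReprEsc (q c : Char) : List Char :=
  if c = '\\' then ['\\','\\']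
  else if c = Char.ofNat 9 then ['\\','t']
  else if c = Char.ofNat 10 then ['\\','n']
  else if c = Char.ofNat 13 then ['\\','r']
  else if c = q then ['\\', q]
  else [c]

-- CPython's quote-choice rule for repr of a string
def pvQuote (s : String) : Char :=
  if s.toList.contains '\'' && !(s.toList.contains '"') then '"' else '\''

-- repr(s) for a Python string s, as a char list
def pvReprStr (s : String) : List Char :=
  pvQuote s :: (s.toList.flatMap (pvReprEsc (pvQuote s)) ++ [pvQuote s])

-- the comma-separated body of str(list-of-strings)
def pvReprBody : List String → List Char
  | [] => []
  | [x] => pvReprStr x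
  | x :: rest => pvReprStr x ++ ',' :: ' ' :: pvReprBody rest

-- str(uitkomst) for a list of strings, as a char list
def pvReprList (xs : List String) : List Char :=
  '[' :: (pvReprBody xs ++ [']'])

-- the inner 'for i in alfabet: … break' loop; returns the final value of doorgaan
-- ('i in werk' on the 1-char string i is char membership)
def pvInner (werk : List Char) : List Char → Bool
  | [] => false
  | i :: rest =>
    let doorgaan := pvAlfabet.contains i && !(werk.contains i)
    if doorgaan then doorgaan else pvInner werk rest

-- the outer 'for land in landen_sorted' loop with its break
def pvOuter (uitkomst : List String) : List String → List String
  | [] => uitkomst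
  | land :: rest =>
    let uitkomst' := uitkomst ++ [land]
    let doorgaan := pvInner (pvReprList uitkomst') pvAlfabet
    if doorgaan = false then uitkomst' else pvOuter uitkomst' rest

def alphabet_set (landen : List String) : List String :=
  let landen_sorted := PySem.List.sorted landen (fun s => PySem.Str.lower s) false
  let landen_sorted := PySem.List.sorted landen_sorted (fun s => PySem.Str.len s) true
  pvOuter [] landen_sorted

-- ===== PORT B =====
-- the letters of 'abcdefghijklmnopqrstuvwxyz' that B's outer loop iterates over
def pvLetters : List Char :=
  ['a','b','c','d','e','f','g','h','i','j','k','l','m','n','o','p','q','r','s','t','u','v','w','x','y','z']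

-- the inner 'for idx, land in enumerate(…): if ch in land: … break' loop:
-- some idx of the first country containing ch, none if the for-loop's else runs
def pvFirstIdx (ch : Char) : List (Int × String) → Option Int
  | [] => none
  | (idx, land) :: rest =>
    if land.toList.contains ch then some idx else pvFirstIdx ch rest

-- the outer 'for ch in "abc…z"' loop carrying stop; early return of the whole list
def pvBGo (ls : List String) (stop : Int) : List Char → List String
  | [] => PySem.List.slice ls none (some (stop + 1))
  | ch :: rest =>
    match pvFirstIdx ch (PySem.List.enumerate ls 0) with
    | none => ls
    | some idx => pvBGo ls (if idx > stop then idx else stop) rest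

def alphabet_set_alt (landen : List String) : List String :=
  let landen_sorted := PySem.List.sorted landen (fun s => PySem.Str.lower s) false
  let landen_sorted := PySem.List.sorted landen_sorted (fun s => PySem.Str.len s) true
  pvBGo landen_sorted (-1) pvLetters

-- ===== PRECONDITION & SPEC =====
-- Pre_ excludes inputs where some country contains a tab/newline/CR: there A's membership
-- test runs against the Python repr of the accumulated list, whose '\t','\n','\r' escape
-- sequences spuriously count as the letters t/n/r — an artefact of A's str() check that no
-- caller would specify; B tests the raw strings there.
def Pre_alphabet_set (landen : List String) : Prop :=
  (landen.all (fun s => s.toList.all (fun c =>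
    !(c = Char.ofNat 9) && !(c = Char.ofNat 10) && !(c = Char.ofNat 13)))) = true
instance (landen : List String) : Decidable (Pre_alphabet_set landen) := by
  unfold Pre_alphabet_set; infer_instance

def pvWitness_alphabet_set : List String := ["The quick brown fox;", "jumps over", "the lazy dog!"]

def Spec_alphabet_set (landen : List String) (out : List String) : Prop := out = alphabet_set_alt landen
instance (landen : List String) (out : List String) : Decidable (Spec_alphabet_set landen out) := by unfold Spec_alphabet_set; infer_instance

-- ===== CLAIM (what is proved, stated in full; the proofs are below) =====
def Claim_equal_alphabet_set : Prop := ∀ (landen : List String), Dom_alphabet_set landen → Pre_alphabet_set landen → Spec_alphabet_set landen (alphabet_set landen)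

-- ===== LEMMAS AND PROOFS =====

-- control-free strings: no tab/newline/CR
def pvClean (s : String) : Prop :=
  (s.toList.all (fun c =>
    !(c = Char.ofNat 9) && !(c = Char.ofNat 10) && !(c = Char.ofNat 13))) = true

-- B-side coverage bool: every letter occurs in some string of xs
def pvCov (xs : List String) : Bool :=
  pvAlfabet.all (fun c => xs.any (fun s => s.toList.contains c))

theorem pvLetter_range {c : Char} (hc : c ∈ pvAlfabet) : 97 ≤ c.toNat ∧ c.toNat ≤ 122 := by
  fin_cases hc <;> decide

theorem pvQuote_cases (s : String) : pvQuote s = '\'' ∨ pvQuote s = '"' := by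
  unfold pvQuote; split_ifs <;> simp

theorem pvEsc_mem_letter {q c a : Char} (hq : q = '\'' ∨ q = '"') (hc : c ∈ pvAlfabet)
    (ha : ¬(a = Char.ofNat 9) ∧ ¬(a = Char.ofNat 10) ∧ ¬(a = Char.ofNat 13)) :
    c ∈ pvReprEsc q a ↔ a = c := by
  have hr := pvLetter_range hc
  have hne1 : c ≠ '\\' := by intro h; rw [h] at hr; revert hr; decide
  have hneq : c ≠ q := by
    rcases hq with h | h <;> (subst h; intro h2; rw [h2] at hr; revert hr; decide)
  obtain ⟨h9, h10, h13⟩ := ha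
  unfold pvReprEsc
  split_ifs with h1 h2
  · subst h1; simp [Ne.symm hne1, hne1]
  · subst h2; simp [hne1, Ne.symm hneq, hneq]
  · simp [eq_comm]

theorem pvClean_chars {s : String} (hs : pvClean s) :
    ∀ a ∈ s.toList, ¬(a = Char.ofNat 9) ∧ ¬(a = Char.ofNat 10) ∧ ¬(a = Char.ofNat 13) := by
  intro a hmem
  unfold pvClean at hs
  rw [List.all_eq_true] at hs
  have := hs a hmem
  simp only [Bool.and_eq_true, Bool.not_eq_eq_eq_not, Bool.not_true, decide_eq_false_iff_not] at this
  tauto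

theorem pvReprStr_mem_letter {s : String} {c : Char} (hc : c ∈ pvAlfabet)
    (hs : pvClean s) : c ∈ pvReprStr s ↔ c ∈ s.toList := by
  have hr := pvLetter_range hc
  have hneq : c ≠ pvQuote s := by
    rcases pvQuote_cases s with h | h <;> (rw [h]; intro h2; rw [h2] at hr; revert hr; decide)
  unfold pvReprStr
  simp only [List.mem_cons, List.mem_append, List.mem_flatMap, List.not_mem_nil, or_false]
  constructor
  · rintro (h | ⟨a, hmem, hesc⟩ | h)
    · exact absurd h hneq
    · rw [pvEsc_mem_letter (pvQuote_cases s) hc (pvClean_chars hs a hmem)] at hesc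
      exact hesc ▸ hmem
    · exact absurd h hneq
  · intro h
    exact Or.inr (Or.inl ⟨c, h, by rw [pvEsc_mem_letter (pvQuote_cases s) hc (pvClean_chars hs c h)]⟩)

theorem pvReprBody_mem_letter {c : Char} (hc : c ∈ pvAlfabet) :
    ∀ (xs : List String), (∀ s ∈ xs, pvClean s) →
    (c ∈ pvReprBody xs ↔ ∃ s ∈ xs, c ∈ s.toList) := by
  have hr := pvLetter_range hc
  have hcomma : c ≠ ',' := by intro h; rw [h] at hr; revert hr; decide
  have hspace : c ≠ ' ' := by intro h; rw [h] at hr; revert hr; decide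
  intro xs
  induction xs with
  | nil => simp [pvReprBody]
  | cons x rest ih =>
    intro hclean
    cases rest with
    | nil =>
      simp only [pvReprBody, List.mem_singleton]
      rw [pvReprStr_mem_letter hc (hclean x (by simp))]
      simp
    | cons y t =>
      have hbody : c ∈ pvReprBody (x :: y :: t) ↔
          c ∈ pvReprStr x ∨ c = ',' ∨ c = ' ' ∨ c ∈ pvReprBody (y :: t) := by
        simp only [pvReprBody, List.mem_append, List.mem_cons]
      rw [hbody, pvReprStr_mem_letter hc (hclean x (by simp)),
        ih (fun s hs => hclean s (List.mem_cons_of_mem _ hs))]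
      constructor
      · rintro (h | h | h | h)
        · exact ⟨x, by simp, h⟩
        · exact absurd h hcomma
        · exact absurd h hspace
        · obtain ⟨s, hs, hcs⟩ := h; exact ⟨s, List.mem_cons_of_mem _ hs, hcs⟩
      · rintro ⟨s, hs, hcs⟩
        rcases List.mem_cons.mp hs with rfl | hs'
        · exact Or.inl hcs
        · exact Or.inr (Or.inr (Or.inr ⟨s, hs', hcs⟩))

theorem pvReprList_contains_letter {xs : List String} {c : Char} (hc : c ∈ pvAlfabet)
    (hs : ∀ s ∈ xs, pvClean s) :
    (pvReprList xs).contains c = xs.any (fun s => s.toList.contains c) := by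
  have hr := pvLetter_range hc
  have hl : c ≠ '[' := by intro h; rw [h] at hr; revert hr; decide
  have hrb : c ≠ ']' := by intro h; rw [h] at hr; revert hr; decide
  rw [Bool.eq_iff_iff]
  rw [List.contains_iff_mem, List.any_eq_true]
  unfold pvReprList
  simp only [List.mem_cons, List.mem_append, List.not_mem_nil, or_false]
  rw [pvReprBody_mem_letter hc xs hs]
  constructor
  · rintro (h | h | h)
    · exact absurd h hl
    · obtain ⟨s, h1, h2⟩ := h; exact ⟨s, h1, List.contains_iff_mem.mpr h2⟩
    · exact absurd h hrb
  · rintro ⟨s, h1, h2⟩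
    exact Or.inr (Or.inl ⟨s, h1, List.contains_iff_mem.mp h2⟩)

theorem pvInner_eq (werk : List Char) (l : List Char) (hl : ∀ i ∈ l, i ∈ pvAlfabet) :
    pvInner werk l = !(l.all (fun i => werk.contains i)) := by
  induction l with
  | nil => rfl
  | cons i rest ih =>
    simp only [pvInner, List.all_cons]
    have hi : pvAlfabet.contains i = true :=
      List.contains_iff_mem.mpr (hl i (by simp))
    rw [hi]
    cases hw : werk.contains i
    · simp
    · simpa using ih (fun x hx => hl x (by simp [hx]))

theorem pvAllCongr {α : Type} (l : List α) (p q : α → Bool)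
    (h : ∀ x ∈ l, p x = q x) : l.all p = l.all q := by
  induction l with
  | nil => rfl
  | cons x r ih =>
    simp only [List.all_cons]
    rw [h x (by simp), ih (fun y hy => h y (by simp [hy]))]

theorem pvInner_eq_not_cov (xs : List String) (hs : ∀ s ∈ xs, pvClean s) :
    pvInner (pvReprList xs) pvAlfabet = !(pvCov xs) := by
  rw [pvInner_eq _ _ (fun i hi => hi)]
  unfold pvCov
  have h : pvAlfabet.all (fun c => (pvReprList xs).contains c)
      = pvAlfabet.all (fun c => xs.any (fun s => s.toList.contains c)) :=
    pvAllCongr pvAlfabet _ _ (fun c hcm => pvReprList_contains_letter hcm hs)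
  rw [h]

theorem pvOuter_of_all_not (rest : List String) : ∀ (acc : List String),
    (∀ s ∈ acc ++ rest, pvClean s) →
    (∀ j : Nat, 1 ≤ j → j ≤ rest.length → pvCov (acc ++ rest.take j) = false) →
    pvOuter acc rest = acc ++ rest := by
  induction rest with
  | nil => intro acc _ _; simp [pvOuter]
  | cons x r ih =>
    intro acc hclean hnc
    simp only [pvOuter]
    have hc1 : pvCov (acc ++ [x]) = false := by
      have := hnc 1 (by omega) (by simp)
      simpa [List.take_succ_cons] using this
    have hin : pvInner (pvReprList (acc ++ [x])) pvAlfabet = true := by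
      rw [pvInner_eq_not_cov _ (fun s hs => hclean s (by
        rcases List.mem_append.mp hs with h | h
        · exact List.mem_append.mpr (Or.inl h)
        · simp at h; subst h; simp))]
      rw [hc1]; rfl
    rw [hin]
    simp only [Bool.true_eq_false, if_false]
    rw [ih (acc ++ [x])
      (by intro s hs; apply hclean; simpa [List.append_assoc] using hs)
      (by
        intro j h1 h2
        have := hnc (j + 1) (by omega) (by simp; omega)
        simpa [List.take_succ_cons, List.append_assoc] using this)]
    simp

theorem pvOuter_of_first (rest : List String) : ∀ (acc : List String) (j : Nat),
    (∀ s ∈ acc ++ rest, pvClean s) →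
    1 ≤ j → j ≤ rest.length → pvCov (acc ++ rest.take j) = true →
    (∀ i : Nat, 1 ≤ i → i < j → pvCov (acc ++ rest.take i) = false) →
    pvOuter acc rest = acc ++ rest.take j := by
  induction rest with
  | nil => intro acc j _ h1 h2 _ _; simp at h2; omega
  | cons x r ih =>
    intro acc j hclean h1 h2 hcov hmin
    have hcleanx : ∀ s ∈ (acc ++ [x]), pvClean s := by
      intro s hs
      apply hclean
      rcases List.mem_append.mp hs with h | h
      · exact List.mem_append.mpr (Or.inl h)
      · simp at h; subst h; simp
    simp only [pvOuter]
    obtain ⟨m, rfl⟩ : ∃ m, j = m + 1 := ⟨j - 1, by omega⟩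
    cases m with
    | zero =>
      have hc1 : pvCov (acc ++ [x]) = true := by simpa [List.take_succ_cons] using hcov
      have hin : pvInner (pvReprList (acc ++ [x])) pvAlfabet = false := by
        rw [pvInner_eq_not_cov _ hcleanx, hc1]; rfl
      rw [hin]
      simp
    | succ m =>
      have hc1 : pvCov (acc ++ [x]) = false := by
        have := hmin 1 (by omega) (by omega)
        simpa using this
      have hin : pvInner (pvReprList (acc ++ [x])) pvAlfabet = true := by
        rw [pvInner_eq_not_cov _ hcleanx, hc1]; rfl
      rw [hin]
      simp only [Bool.true_eq_false, if_false]
      rw [ih (acc ++ [x]) (m + 1)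
        (by intro s hs; apply hclean; simpa [List.append_assoc] using hs)
        (by omega)
        (by simp at h2 ⊢; omega)
        (by
          have := hcov
          simpa [List.take_succ_cons, List.append_assoc] using this)
        (by
          intro i hi1 hi2
          have := hmin (i + 1) (by omega) (by omega)
          simpa [List.take_succ_cons, List.append_assoc] using this)]
      simp [List.take_succ_cons, List.append_assoc]

theorem pvFirstIdx_enumerate (ch : Char) (ls : List String) : ∀ (n : Int),
    pvFirstIdx ch (PySem.List.enumerate ls n)
      = (ls.findIdx? (fun s => s.toList.contains ch)).map (fun (k : Nat) => n + (k : Int)) := by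
  induction ls with
  | nil => intro n; simp [pvFirstIdx, PySem.List.enumerate_nil]
  | cons x r ih =>
    intro n
    rw [PySem.List.enumerate_cons]
    simp only [pvFirstIdx, List.findIdx?_cons]
    cases hx : x.toList.contains ch
    · simp only [Bool.false_eq_true, if_false, ih (n + 1)]
      cases h : List.findIdx? (fun s => s.toList.contains ch) r with
      | none => simp
      | some k =>
        simp only [Option.map_some]
        congr 1
        push_cast
        ring
    · simp

theorem pvBGo_of_missing (rem : List Char) : ∀ (ls : List String) (stop : Int),
    (∃ c ∈ rem, ls.findIdx? (fun s => s.toList.contains c) = none) →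
    pvBGo ls stop rem = ls := by
  induction rem with
  | nil => intro ls stop h; simp at h
  | cons c r ih =>
    intro ls stop h
    simp only [pvBGo]
    rw [pvFirstIdx_enumerate]
    cases hc : ls.findIdx? (fun s => s.toList.contains c) with
    | none => simp
    | some k =>
      simp only [Option.map_some]
      apply ih
      obtain ⟨c', hc', hn⟩ := h
      rcases List.mem_cons.mp hc' with rfl | hmem
      · rw [hc] at hn; exact absurd hn (by simp)
      · exact ⟨c', hmem, hn⟩

theorem pvBGo_of_found (rem : List Char) : ∀ (ls : List String) (stop : Int),
    (∀ c ∈ rem, (ls.findIdx? (fun s => s.toList.contains c)).isSome) →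
    pvBGo ls stop rem
      = PySem.List.slice ls none
          (some ((rem.foldl (fun st c =>
              max st ((((ls.findIdx? (fun s => s.toList.contains c)).getD 0 : Nat) : Int))) stop) + 1)) := by
  induction rem with
  | nil => intro ls stop _; rfl
  | cons c r ih =>
    intro ls stop hall
    obtain ⟨k, hk⟩ := Option.isSome_iff_exists.mp (hall c (by simp))
    simp only [pvBGo]
    rw [pvFirstIdx_enumerate, hk]
    show pvBGo ls (if (0:Int) + (k:Int) > stop then (0:Int) + (k:Int) else stop) r = _
    have harg : (if (0:Int) + (k:Int) > stop then (0:Int) + (k:Int) else stop) = max stop (k:Int) := by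
      omega
    rw [harg, ih ls _ (fun c' hc' => hall c' (List.mem_cons_of_mem _ hc'))]
    simp only [List.foldl_cons, hk, Option.getD_some]

theorem pvTakeAny (p : String → Bool) (ls : List String) : ∀ j : Nat,
    ((ls.take j).any p = true) ↔ ∃ k, ls.findIdx? p = some k ∧ k < j := by
  induction ls with
  | nil => intro j; simp
  | cons x r ih =>
    intro j
    cases j with
    | zero => simp
    | succ m =>
      simp only [List.take_succ_cons, List.any_cons, List.findIdx?_cons]
      cases hx : p x
      · simp only [Bool.false_eq_true, if_false, Bool.false_or]
        rw [ih m]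
        constructor
        · rintro ⟨k, hk, hlt⟩
          exact ⟨k + 1, by simp [hk], by omega⟩
        · rintro ⟨k, hk, hlt⟩
          rcases Option.map_eq_some_iff.mp hk with ⟨k', hk', rfl⟩
          exact ⟨k', hk', by omega⟩
      · simp

theorem pvCov_take_iff (ls : List String) (j : Nat) :
    pvCov (ls.take j) = true ↔
      ∀ c ∈ pvAlfabet, ∃ k, ls.findIdx? (fun s => s.toList.contains c) = some k ∧ k < j := by
  unfold pvCov
  rw [List.all_eq_true]
  apply forall₂_congr
  intro c _
  exact pvTakeAny _ ls j

theorem pvFoldMax_init_le (f : Char → Int) (l : List Char) : ∀ (init : Int),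
    init ≤ l.foldl (fun st c => max st (f c)) init := by
  induction l with
  | nil => intro init; simp
  | cons x r ih => intro init; exact le_trans (le_max_left _ _) (ih _)

theorem pvFoldMax_le_of_mem (f : Char → Int) (l : List Char) : ∀ (init : Int) (c : Char),
    c ∈ l → f c ≤ l.foldl (fun st c => max st (f c)) init := by
  induction l with
  | nil => intro _ _ h; simp at h
  | cons x r ih =>
    intro init c hc
    simp only [List.foldl_cons]
    rcases List.mem_cons.mp hc with rfl | hmem
    · exact le_trans (le_max_right _ _) (pvFoldMax_init_le f r _)
    · exact ih _ c hmem

theorem pvFoldMax_cases (f : Char → Int) (l : List Char) : ∀ (init : Int),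
    l.foldl (fun st c => max st (f c)) init = init ∨
      ∃ c ∈ l, l.foldl (fun st c => max st (f c)) init = f c := by
  induction l with
  | nil => intro init; simp
  | cons x r ih =>
    intro init
    simp only [List.foldl_cons]
    rcases ih (max init (f x)) with h | ⟨c, hc, h⟩
    · rcases max_cases init (f x) with ⟨he, _⟩ | ⟨he, _⟩
      · exact Or.inl (h.trans he)
      · exact Or.inr ⟨x, by simp, h.trans he⟩
    · exact Or.inr ⟨c, by simp [hc], h⟩

theorem pvFindIdx?_lt_length {p : String → Bool} {ls : List String} {k : Nat}
    (h : ls.findIdx? p = some k) : k < ls.length :=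
  (List.findIdx?_eq_some_iff_findIdx_eq.mp h).1

-- ===== VERDICT (by name: the statement is the Claim_ definition above) =====
theorem alphabet_set_spec : Claim_equal_alphabet_set := by
  unfold Claim_equal_alphabet_set Spec_alphabet_set
  intro landen _ hpre
  unfold alphabet_set alphabet_set_alt
  set L := PySem.List.sorted (PySem.List.sorted landen (fun s => PySem.Str.lower s) false) (fun s => PySem.Str.len s) true with hL
  have hclean : ∀ s ∈ L, pvClean s := by
    intro s hs
    have hmem : s ∈ landen := by
      rw [hL, PySem.List.mem_sorted, PySem.List.mem_sorted] at hs
      exact hs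
    unfold Pre_alphabet_set at hpre
    rw [List.all_eq_true] at hpre
    exact hpre s hmem
  show pvOuter [] L = pvBGo L (-1) pvLetters
  have hLetters : pvLetters = pvAlfabet := rfl
  rw [hLetters]
  by_cases hall : ∀ c ∈ pvAlfabet, (L.findIdx? (fun s => s.toList.contains c)).isSome
  · set f : Char → Int := fun c => (((L.findIdx? (fun s => s.toList.contains c)).getD 0 : Nat) : Int) with hf
    set F : Int := pvAlfabet.foldl (fun st c => max st (f c)) (-1) with hF
    have hfnn : ∀ c, 0 ≤ f c := by intro c; simp [hf]
    have hFmem : ∃ c ∈ pvAlfabet, F = f c := by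
      rcases pvFoldMax_cases f pvAlfabet (-1) with h | h
      · exfalso
        have h1 := pvFoldMax_le_of_mem f pvAlfabet (-1) 'a' (by decide)
        have h2 := hfnn 'a'
        rw [← hF] at h1
        omega
      · exact h
    have hF0 : 0 ≤ F := by
      obtain ⟨c, _, hc⟩ := hFmem
      rw [hc]; exact hfnn c
    have hfk : ∀ c ∈ pvAlfabet, ∃ k, L.findIdx? (fun s => s.toList.contains c) = some k ∧ (k : Int) = f c := by
      intro c hc
      obtain ⟨k, hk⟩ := Option.isSome_iff_exists.mp (hall c hc)
      exact ⟨k, hk, by simp only [hf, hk, Option.getD_some]⟩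
    rw [pvBGo_of_found pvAlfabet L (-1) hall]
    have hslice : PySem.List.slice L none (some (F + 1)) = L.take (F + 1).toNat := by
      have h : F + 1 = (((F + 1).toNat : Nat) : Int) := by omega
      rw [h, PySem.List.slice_to_natCast, Int.toNat_natCast]
    rw [← hF, hslice]
    set j := (F + 1).toNat with hj
    have hjlen : j ≤ L.length := by
      obtain ⟨c, hc, hFc⟩ := hFmem
      obtain ⟨k, hk, hkf⟩ := hfk c hc
      have := pvFindIdx?_lt_length hk
      omega
    have hcovj : pvCov (L.take j) = true := by
      rw [pvCov_take_iff]
      intro c hc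
      obtain ⟨k, hk, hkf⟩ := hfk c hc
      refine ⟨k, hk, ?_⟩
      have hle := pvFoldMax_le_of_mem f pvAlfabet (-1) c hc
      rw [← hF] at hle
      omega
    have hmin : ∀ i : Nat, 1 ≤ i → i < j → pvCov (L.take i) = false := by
      intro i h1 h2
      obtain ⟨c, hc, hFc⟩ := hFmem
      obtain ⟨k, hk, hkf⟩ := hfk c hc
      by_contra hcv
      rw [Bool.not_eq_false, pvCov_take_iff] at hcv
      obtain ⟨k', hk', hlt⟩ := hcv c hc
      rw [hk] at hk'
      have : k = k' := by injection hk'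
      omega
    have := pvOuter_of_first L [] j (by simpa using hclean) (by omega) hjlen
      (by simpa using hcovj) (by simpa using hmin)
    simpa using this
  · rw [not_forall] at hall
    simp only [not_forall, exists_prop] at hall
    obtain ⟨c, hc, hnone0⟩ := hall
    have hnone : List.findIdx? (fun s => s.toList.contains c) L = none :=
      Option.not_isSome_iff_eq_none.mp (by simpa using hnone0)
    rw [pvBGo_of_missing pvAlfabet L (-1) ⟨c, hc, hnone⟩]
    have hnc : ∀ j : Nat, 1 ≤ j → j ≤ L.length → pvCov (L.take j) = false := by
      intro j _ _
      by_contra hcv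
      rw [Bool.not_eq_false, pvCov_take_iff] at hcv
      obtain ⟨k, hk, _⟩ := hcv c hc
      rw [hnone] at hk
      exact absurd hk (by simp)
    have := pvOuter_of_all_not L [] (by simpa using hclean) (by simpa using hnc)
    simpa using this
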